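-- pv_equiv track=rewrite | github.com/extremexp-HORIZON/extremexp-AnalyticsCatalogue | libraries/opportunistic_ml/randomly-constrained-learning-master/rcl/util.py | get_varying
-- ===== SOURCE A (Python) =====
-- from collections.abc import Iterable, Iterator, Callable, Hashable
--
-- def get_varying(dicts:Iterable[dict])->list:
--     par_sets = {}
--     for par in dicts:
--         for k, v in par.items():
--             if isinstance(v, dict):
--                 v = tuple(sorted(v.items()))
--             if k in par_sets:
--                 par_sets[k].add(v)
--             else:
--                 par_sets[k] = {v}
--     return sorted([k for k, v in par_sets.items() if len(v)>1])
-- ===== SOURCE B (Python) =====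
-- def get_varying(dicts):
--     first = {}
--     varying = set()
--     for par in dicts:
--         for k, v in par.items():
--             if isinstance(v, dict):
--                 v = tuple(sorted(v.items()))
--             if k not in first:
--                 first[k] = v
--             elif k not in varying and v != first[k]:
--                 varying.add(k)
--     return sorted(varying)
-- ===== Notes on version B (the rewrite author's own statement) =====
-- stated objective: simpler
-- what changed: Instead of accumulating a set of all distinct values per key and filtering by set size at the end, B keeps only the first value seen per key plus a set of keys already known to vary, deciding 'varying' online with one equality test; it returns sorted(varying).
import Mathlib
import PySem

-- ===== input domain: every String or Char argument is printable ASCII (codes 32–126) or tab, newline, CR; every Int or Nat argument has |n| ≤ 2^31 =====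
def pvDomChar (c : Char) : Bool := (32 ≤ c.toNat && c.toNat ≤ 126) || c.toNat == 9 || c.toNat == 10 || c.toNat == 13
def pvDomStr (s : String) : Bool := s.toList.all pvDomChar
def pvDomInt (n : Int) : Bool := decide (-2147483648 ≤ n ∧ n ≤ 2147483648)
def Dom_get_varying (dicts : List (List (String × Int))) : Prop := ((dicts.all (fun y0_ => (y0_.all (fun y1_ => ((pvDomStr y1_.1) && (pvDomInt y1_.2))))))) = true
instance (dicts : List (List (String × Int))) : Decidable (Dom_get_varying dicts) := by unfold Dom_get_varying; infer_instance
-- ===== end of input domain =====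

-- B keeps only the first value per key and a set of keys known to vary, instead of A's
-- per-key set of all distinct values filtered by size at the end.

-- ===== PORT A =====
-- one step of A's inner loop: add v to the per-key set (values here are ints, so the
-- Python 'isinstance(v, dict)' normalization branch never fires and is not ported)
def pvStepA (ps : PySem.Dict String (PySem.Set Int)) (kv : String × Int) :
    PySem.Dict String (PySem.Set Int) :=
  if ps.contains kv.1 then ps.insert kv.1 (PySem.Set.add (ps.getD kv.1 []) kv.2)
  else ps.insert kv.1 [kv.2]

def get_varying (dicts : List (List (String × Int))) : List String :=
  let par_sets := dicts.foldl (fun ps par => par.foldl pvStepA ps) PySem.Dict.empty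
  PySem.List.sorted
    ((par_sets.items.filter (fun p => 1 < PySem.Set.len p.2)).map (·.1)) (fun x => x) false

-- ===== PORT B =====
-- one step of B's inner loop over the state (first-value dict, varying key set)
def pvStepB (st : PySem.Dict String Int × PySem.Set String) (kv : String × Int) :
    PySem.Dict String Int × PySem.Set String :=
  if ¬ st.1.contains kv.1 then (st.1.insert kv.1 kv.2, st.2)
  else if ¬ (st.2.contains kv.1) ∧ kv.2 ≠ st.1.getD kv.1 0 then
    (st.1, PySem.Set.add st.2 kv.1)
  else st

def get_varying_alt (dicts : List (List (String × Int))) : List String :=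
  let st := dicts.foldl (fun st par => par.foldl pvStepB st)
    (PySem.Dict.empty, PySem.Set.empty)
  PySem.List.sorted st.2 (fun x => x) false

-- ===== PRECONDITION & SPEC =====
def Spec_get_varying (dicts : List (List (String × Int))) (out : List String) : Prop := out = get_varying_alt dicts
instance (dicts : List (List (String × Int))) (out : List String) : Decidable (Spec_get_varying dicts out) := by unfold Spec_get_varying; infer_instance

-- ===== CLAIM (what is proved, stated in full; the proofs are below) =====
def Claim_equal_get_varying : Prop := ∀ (dicts : List (List (String × Int))), Dom_get_varying dicts → Spec_get_varying dicts (get_varying dicts)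

-- ===== LEMMAS AND PROOFS =====

-- set helpers used by the invariant proofs
lemma pv_nodup_add {a : Type} [BEq a] [LawfulBEq a] (s : List a) (x : a) (hs : s.Nodup) :
    (PySem.Set.add s x).Nodup := by
  unfold PySem.Set.add; split
  · exact hs
  · refine List.Nodup.append hs (List.nodup_singleton x) ?_
    intro y hy hb; simp at hb; subst hb
    rename_i hc; simp at hc; exact hc hy

lemma pv_add_of_mem {a : Type} [BEq a] [LawfulBEq a] {s : List a} {x : a} (h : x ∈ s) :
    PySem.Set.add s x = s := by
  unfold PySem.Set.add; simp [h]

lemma pv_add_of_not_mem {a : Type} [BEq a] [LawfulBEq a] {s : List a} {x : a} (h : x ∉ s) :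
    PySem.Set.add s x = s ++ [x] := by
  unfold PySem.Set.add; simp [h]

lemma pv_len_add_ge {a : Type} [BEq a] (s : List a) (x : a) :
    s.length ≤ (PySem.Set.add s x).length := by
  unfold PySem.Set.add; split <;> simp

-- the invariant relating A's per-key value sets to B's (first value, varying keys) state
def pvInv (d : PySem.Dict String (PySem.Set Int))
    (first : PySem.Dict String Int) (varying : PySem.Set String) : Prop :=
  d.keys.Nodup ∧ varying.Nodup ∧
  (∀ k, d.contains k = first.contains k) ∧
  (∀ k ∈ varying, first.contains k = true) ∧
  (∀ k f, first.get? k = some f →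
    ∃ s, d.get? k = some s ∧ s.Nodup ∧ f ∈ s ∧
      ((k ∈ varying) ↔ 2 ≤ s.length) ∧ (s.length ≤ 1 → s = [f]))

lemma pvInv_empty : pvInv PySem.Dict.empty PySem.Dict.empty PySem.Set.empty := by
  refine ⟨?_, ?_, ?_, ?_, ?_⟩
  · simp [PySem.Dict.keys_empty]
  · simp [PySem.Set.empty]
  · intro k; rfl
  · intro k hk; simp [PySem.Set.empty] at hk
  · intro k f hf; simp [PySem.Dict.get?_empty] at hf

lemma pvInv_step (d : PySem.Dict String (PySem.Set Int))
    (first : PySem.Dict String Int) (varying : PySem.Set String)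
    (h : pvInv d first varying) (kv : String × Int) :
    pvInv (pvStepA d kv) (pvStepB (first, varying) kv).1 (pvStepB (first, varying) kv).2 := by
  obtain ⟨hnd, hvnd, hck, hvf, hmain⟩ := h
  obtain ⟨k, v⟩ := kv
  by_cases hc : first.contains k = true
  · -- k already has a first value
    obtain ⟨f, hf⟩ : ∃ f, first.get? k = some f := by
      rw [PySem.Dict.contains_eq_isSome_get?] at hc; exact Option.isSome_iff_exists.mp hc
    obtain ⟨s, hds, hsnd, hfs, hiff, hsing⟩ := hmain k f hf
    have hdc : d.contains k = true := by rw [hck]; exact hc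
    have hgetD : d.getD k [] = s := PySem.Dict.getD_of_get?_eq_some d [] hds
    have hfirstD : first.getD k 0 = f := PySem.Dict.getD_of_get?_eq_some first 0 hf
    have hstepA : pvStepA d (k, v) = d.insert k (PySem.Set.add s v) := by
      simp [pvStepA, hdc, hgetD]
    have hcontains : ∀ k', (d.insert k (PySem.Set.add s v)).contains k' = first.contains k' := by
      intro k'
      rw [PySem.Dict.contains_insert]
      by_cases hkk : k' = k
      · simp [hkk, hc]
      · simp [hkk, hck]
    have hndk : (d.insert k (PySem.Set.add s v)).keys.Nodup := PySem.Dict.nodup_keys_insert _ _ _ hnd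
    by_cases hkv : k ∈ varying
    · -- already known to vary: B leaves its state alone
      have hvc : varying.contains k = true := List.contains_iff_mem.mpr hkv
      have hstepB : pvStepB (first, varying) (k, v) = (first, varying) := by
        simp [pvStepB, hc, hvc]
        intro h1 _
        exact absurd hkv h1
      rw [hstepA, hstepB]
      refine ⟨hndk, hvnd, hcontains, hvf, ?_⟩
      intro k' f' hf'
      by_cases hkk : k' = k
      · subst hkk
        rw [hf] at hf'; injection hf' with hff; subst hff
        have h2 : 2 ≤ s.length := hiff.mp hkv
        have h2' : 2 ≤ (PySem.Set.add s v).length := le_trans h2 (pv_len_add_ge s v)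
        refine ⟨PySem.Set.add s v, PySem.Dict.get?_insert_self _ _ _,
          pv_nodup_add s v hsnd, ?_, ?_, ?_⟩
        · by_cases hvm : v ∈ s
          · rw [pv_add_of_mem hvm]; exact hfs
          · rw [pv_add_of_not_mem hvm]; exact List.mem_append_left _ hfs
        · exact ⟨fun _ => h2', fun _ => hkv⟩
        · intro hle; omega
      · rw [PySem.Dict.get?_insert_of_ne _ _ hkk]
        exact hmain k' f' hf'
    · -- k not yet varying: A's set so far is the singleton [f]
      have hvc : varying.contains k = false := by
        simp [List.contains_iff_mem]; exact hkv
      have hs1 : s = [f] := hsing (by by_contra hh; exact hkv (hiff.mpr (by omega)))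
      by_cases hvf2 : v = f
      · -- same value again: nothing changes on either side
        have hstepB : pvStepB (first, varying) (k, v) = (first, varying) := by
          simp [pvStepB, hc, hfirstD, hvf2]
        have hadd : PySem.Set.add s v = s := pv_add_of_mem (by rw [hs1, hvf2]; simp)
        rw [hstepA, hstepB, hadd]
        have hcontains' : ∀ k', (d.insert k s).contains k' = first.contains k' := by
          intro k'; have := hcontains k'; rwa [hadd] at this
        refine ⟨by rw [← hadd]; exact hndk, hvnd, hcontains', hvf, ?_⟩
        intro k' f' hf'
        by_cases hkk : k' = k
        · subst hkk
          rw [hf] at hf'; injection hf' with hff; subst hff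
          exact ⟨s, PySem.Dict.get?_insert_self _ _ _, hsnd, hfs, hiff, hsing⟩
        · rw [PySem.Dict.get?_insert_of_ne _ _ hkk]
          exact hmain k' f' hf'
      · -- a second distinct value: B marks k as varying
        have hstepB : pvStepB (first, varying) (k, v) =
            (first, varying ++ [k]) := by
          have : PySem.Set.add varying k = varying ++ [k] := pv_add_of_not_mem hkv
          simp [pvStepB, hc, hfirstD, hvf2, this]
          exact hkv
        have hadd : PySem.Set.add s v = [f, v] := by
          rw [hs1, pv_add_of_not_mem (by simp [hvf2])]; rfl
        rw [hstepA, hstepB, hadd]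
        have hcontains' : ∀ k', (d.insert k [f, v]).contains k' = first.contains k' := by
          intro k'; have := hcontains k'; rwa [hadd] at this
        refine ⟨by rw [← hadd]; exact hndk, ?_, hcontains', ?_, ?_⟩
        · exact List.Nodup.append hvnd (List.nodup_singleton k)
            (by intro y hy hb; simp at hb; subst hb; exact hkv hy)
        · intro k' hk'
          rcases List.mem_append.mp hk' with h1 | h1
          · exact hvf k' h1
          · simp at h1; subst h1; exact hc
        · intro k' f' hf'
          by_cases hkk : k' = k
          · subst hkk
            rw [hf] at hf'; injection hf' with hff; subst hff
            refine ⟨[f, v], PySem.Dict.get?_insert_self _ _ _, by simp [Ne.symm hvf2], by simp, ?_, by intro hle; simp at hle⟩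
            constructor
            · intro _; simp
            · intro _; exact List.mem_append_right _ (by simp)
          · rw [PySem.Dict.get?_insert_of_ne _ _ hkk]
            obtain ⟨s', a1, a2, a3, a4, a5⟩ := hmain k' f' hf'
            refine ⟨s', a1, a2, a3, ?_, a5⟩
            rw [← a4]
            simp [List.mem_append, hkk]
  · -- k is new: both sides insert a fresh entry
    have hdc : d.contains k = false := by rw [hck]; simpa using hc
    have hkvv : k ∉ varying := fun hh => hc (hvf k hh)
    have hstepA : pvStepA d (k, v) = d.insert k [v] := by
      simp [pvStepA, hdc]
    have hstepB : pvStepB (first, varying) (k, v) = (first.insert k v, varying) := by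
      simp [pvStepB, hc]
    rw [hstepA, hstepB]
    refine ⟨PySem.Dict.nodup_keys_insert _ _ _ hnd, hvnd, ?_, ?_, ?_⟩
    · intro k'
      rw [PySem.Dict.contains_insert, PySem.Dict.contains_insert, hck]
    · intro k' hk'
      rw [PySem.Dict.contains_insert]
      simp [hvf k' hk']
    · intro k' f' hf'
      by_cases hkk : k' = k
      · subst hkk
        rw [PySem.Dict.get?_insert_self] at hf'
        obtain rfl : v = f' := by injection hf'
        refine ⟨[v], PySem.Dict.get?_insert_self _ _ _, List.nodup_singleton _, by simp, ?_, fun _ => rfl⟩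
        simp [hkvv]
      · rw [PySem.Dict.get?_insert_of_ne _ _ hkk] at hf'
        rw [PySem.Dict.get?_insert_of_ne _ _ hkk]
        exact hmain k' f' hf'

lemma pvInv_foldl (l : List (String × Int)) (d : PySem.Dict String (PySem.Set Int))
    (first : PySem.Dict String Int) (varying : PySem.Set String)
    (h : pvInv d first varying) :
    pvInv (l.foldl pvStepA d) (l.foldl pvStepB (first, varying)).1
      (l.foldl pvStepB (first, varying)).2 := by
  induction l generalizing d first varying with
  | nil => exact h
  | cons kv t ih =>
      have := ih _ _ _ (pvInv_step d first varying h kv)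
      simpa using this

lemma pvInv_foldl2 (ls : List (List (String × Int)))
    (d : PySem.Dict String (PySem.Set Int))
    (first : PySem.Dict String Int) (varying : PySem.Set String)
    (h : pvInv d first varying) :
    pvInv (ls.foldl (fun ps par => par.foldl pvStepA ps) d)
      (ls.foldl (fun st par => par.foldl pvStepB st) (first, varying)).1
      (ls.foldl (fun st par => par.foldl pvStepB st) (first, varying)).2 := by
  induction ls generalizing d first varying with
  | nil => exact h
  | cons p t ih =>
      have := ih _ _ _ (pvInv_foldl p d first varying h)
      simpa using this

lemma pv_final (d : PySem.Dict String (PySem.Set Int))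
    (first : PySem.Dict String Int) (varying : PySem.Set String)
    (h : pvInv d first varying) :
    PySem.List.sorted ((d.items.filter (fun p => 1 < PySem.Set.len p.2)).map (·.1)) (fun x => x) false
      = PySem.List.sorted varying (fun x => x) false := by
  obtain ⟨hnd, hvnd, hck, hvf, hmain⟩ := h
  have hkeys : d.items.map (·.1) = d.keys := rfl
  have hLnd : ((d.items.filter (fun p => 1 < PySem.Set.len p.2)).map (·.1)).Nodup := by
    have hsub : List.Sublist ((d.items.filter (fun p => 1 < PySem.Set.len p.2)).map (·.1))
        (d.items.map (·.1)) := List.Sublist.map _ List.filter_sublist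
    rw [hkeys] at hsub
    exact hnd.sublist hsub
  have hmem : ∀ x, x ∈ (d.items.filter (fun p => 1 < PySem.Set.len p.2)).map (·.1) ↔ x ∈ varying := by
    intro x
    constructor
    · intro hx
      simp only [List.mem_map, List.mem_filter] at hx
      obtain ⟨⟨kk, s⟩, ⟨hmemi, hlen⟩, hfst⟩ := hx
      simp only at hfst
      subst hfst
      simp [PySem.Set.len] at hlen
      have hget : d.get? kk = some s := PySem.Dict.get?_of_mem_items d hmemi hnd
      have hc : first.contains kk = true := by
        rw [← hck, PySem.Dict.contains_eq_isSome_get?, hget]; rfl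
      obtain ⟨f, hf⟩ : ∃ f, first.get? kk = some f := by
        rw [PySem.Dict.contains_eq_isSome_get?] at hc; exact Option.isSome_iff_exists.mp hc
      obtain ⟨s', hs', _, _, hiff, _⟩ := hmain kk f hf
      rw [hget] at hs'; injection hs' with hss; subst hss
      exact hiff.mpr (by omega)
    · intro hx
      have hc := hvf x hx
      obtain ⟨f, hf⟩ : ∃ f, first.get? x = some f := by
        rw [PySem.Dict.contains_eq_isSome_get?] at hc; exact Option.isSome_iff_exists.mp hc
      obtain ⟨s, hgs, _, _, hiff, _⟩ := hmain x f hf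
      have h2 := hiff.mp hx
      have hmemi : (x, s) ∈ d.items := PySem.Dict.mem_items_of_get?_eq_some d hgs
      simp only [List.mem_map, List.mem_filter]
      exact ⟨(x, s), ⟨hmemi, by simp [PySem.Set.len]; omega⟩, rfl⟩
  exact PySem.List.sorted_eq_sorted_of_perm _ _ _ (fun a b hab => hab)
    ((List.perm_ext_iff_of_nodup hLnd hvnd).mpr hmem)

-- ===== VERDICT (by name: the statement is the Claim_ definition above) =====
theorem get_varying_spec : Claim_equal_get_varying := by
  intro dicts _
  show get_varying dicts = get_varying_alt dicts
  unfold get_varying get_varying_alt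
  exact pv_final _ _ _ (pvInv_foldl2 dicts _ _ _ pvInv_empty)
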